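-- pv_equiv track=rewrite | github.com/stenknutsen/HomeGrownPOSTagger | PhaseThreeTagging.py | more_UNK_than_AdjectiveTagger
-- ===== SOURCE A (Python) =====
-- def more_UNK_than_AdjectiveTagger(sent):
--     sentToReturn = []
--     skip = 0
--
--     for i in range(len(sent)):
--
--         if skip>0:
--             skip = skip -1
--             continue
--
--         if (i)<0 | (i+2)>=len(sent):
--             sentToReturn += [sent[i]]
--             continue
--
--         leftContext = sent[i]
--         target = sent[i+1]
--         rightContext = sent[i+2]
--
--         if (leftContext[0].lower()=="more")&(rightContext[0].lower()=="than"):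
--
--             sentToReturn += [(leftContext[0],"RBR")]
--             sentToReturn += [(target[0],"JJ")]
--             sentToReturn += [(rightContext[0],"IN")]
--             skip = 2
--
--         else:
--             sentToReturn += [leftContext]
--
--     return sentToReturn
-- ===== SOURCE B (Python) =====
-- def more_UNK_than_AdjectiveTagger(sent):
--     # Pass 1: greedy, non-overlapping match start indices for "more X than".
--     starts = []
--     i = 0
--     while i < len(sent):
--         if i + 2 < len(sent) and sent[i][0].lower() == "more" and sent[i + 2][0].lower() == "than":
--             starts.append(i)
--             i += 3
--         else:
--             i += 1
--     # Pass 2: consume the start list front-to-back while emitting tokens.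
--     out = []
--     j = 0
--     k = 0
--     while j < len(sent):
--         if k < len(starts) and starts[k] == j:
--             out.append((sent[j][0], "RBR"))
--             out.append((sent[j + 1][0], "JJ"))
--             out.append((sent[j + 2][0], "IN"))
--             k += 1
--             j += 3
--         else:
--             out.append(sent[j])
--             j += 1
--     return out
-- ===== Notes on version B (the rewrite author's own statement) =====
-- stated objective: alternative
-- what changed: Replaces A's single-loop skip-counter state machine with a two-pass decomposition: first a scan collecting the greedy non-overlapping match start indices, then an emit pass that consumes that index list front-to-back.
import Mathlib
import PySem

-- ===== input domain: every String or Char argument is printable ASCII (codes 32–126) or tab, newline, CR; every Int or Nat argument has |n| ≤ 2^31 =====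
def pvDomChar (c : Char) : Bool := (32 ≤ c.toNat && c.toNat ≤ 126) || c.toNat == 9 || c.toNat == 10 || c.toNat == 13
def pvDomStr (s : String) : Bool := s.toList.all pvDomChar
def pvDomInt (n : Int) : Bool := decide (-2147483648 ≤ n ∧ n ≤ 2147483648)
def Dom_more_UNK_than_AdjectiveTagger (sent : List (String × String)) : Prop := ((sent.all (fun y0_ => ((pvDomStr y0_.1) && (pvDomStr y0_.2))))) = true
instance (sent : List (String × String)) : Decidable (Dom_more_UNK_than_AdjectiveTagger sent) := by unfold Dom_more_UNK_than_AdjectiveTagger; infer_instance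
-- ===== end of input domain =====

-- B replaces A's skip-counter state machine by a two-pass decomposition
-- (collect greedy match start indices, then emit consuming that list); same behaviour, alternative structure.

-- ===== PORT A =====
-- A's for-loop over range(len(sent)) with the skip counter, as index recursion.
-- Python's 'if (i)<0 | (i+2)>=len(sent)' parses (| binds tighter than comparisons) as the
-- chained comparison i < (0 | (i+2)) >= len(sent); 0 | (i+2) = i+2, hence the condition below.
def pvALoop (sent : List (String × String)) (i : Nat) (skip : Int) (acc : List (String × String)) : List (String × String) :=
  if _h : i < sent.length then
    if skip > 0 then pvALoop sent (i + 1) (skip - 1) acc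
    else if (i : Int) < PySem.Int.bor 0 ((i : Int) + 2) ∧ PySem.Int.bor 0 ((i : Int) + 2) ≥ (sent.length : Int) then
      pvALoop sent (i + 1) skip (acc ++ [sent.getD i ("", "")])
    else
      let leftContext := sent.getD i ("", "")
      let target := sent.getD (i + 1) ("", "")
      let rightContext := sent.getD (i + 2) ("", "")
      if PySem.Str.lower leftContext.1 == "more" && PySem.Str.lower rightContext.1 == "than" then
        pvALoop sent (i + 1) 2 (acc ++ [(leftContext.1, "RBR")] ++ [(target.1, "JJ")] ++ [(rightContext.1, "IN")])
      else
        pvALoop sent (i + 1) skip (acc ++ [leftContext])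
  else acc
termination_by sent.length - i

def more_UNK_than_AdjectiveTagger (sent : List (String × String)) : List (String × String) :=
  pvALoop sent 0 0 []

-- ===== PORT B =====
-- Pass 1: greedy non-overlapping start indices of "more X than".
def pvBStarts (sent : List (String × String)) (i : Nat) : List Nat :=
  if _h : i < sent.length then
    if i + 2 < sent.length ∧ PySem.Str.lower (sent.getD i ("", "")).1 = "more"
        ∧ PySem.Str.lower (sent.getD (i + 2) ("", "")).1 = "than" then
      i :: pvBStarts sent (i + 3)
    else pvBStarts sent (i + 1)
  else []
termination_by sent.length - i

-- Pass 2: emit, consuming the start list front-to-back.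
def pvBEmit (sent : List (String × String)) (starts : List Nat) (j : Nat) : List (String × String) :=
  if _h : j < sent.length then
    match starts with
    | s :: rest =>
      if s = j then
        ((sent.getD j ("", "")).1, "RBR") :: ((sent.getD (j + 1) ("", "")).1, "JJ")
          :: ((sent.getD (j + 2) ("", "")).1, "IN") :: pvBEmit sent rest (j + 3)
      else sent.getD j ("", "") :: pvBEmit sent starts (j + 1)
    | [] => sent.getD j ("", "") :: pvBEmit sent [] (j + 1)
  else []
termination_by sent.length - j

def more_UNK_than_AdjectiveTagger_alt (sent : List (String × String)) : List (String × String) :=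
  pvBEmit sent (pvBStarts sent 0) 0

-- ===== PRECONDITION & SPEC =====
def Spec_more_UNK_than_AdjectiveTagger (sent : List (String × String)) (out : List (String × String)) : Prop := out = more_UNK_than_AdjectiveTagger_alt sent
instance (sent : List (String × String)) (out : List (String × String)) : Decidable (Spec_more_UNK_than_AdjectiveTagger sent out) := by unfold Spec_more_UNK_than_AdjectiveTagger; infer_instance

-- ===== CLAIM (what is proved, stated in full; the proofs are below) =====
def Claim_equal_more_UNK_than_AdjectiveTagger : Prop := ∀ (sent : List (String × String)), Dom_more_UNK_than_AdjectiveTagger sent → Spec_more_UNK_than_AdjectiveTagger sent (more_UNK_than_AdjectiveTagger sent)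

-- ===== LEMMAS AND PROOFS =====

-- Common reference recursion: the tagged sentence from position i onward.
def pvGo (sent : List (String × String)) (i : Nat) : List (String × String) :=
  if _h : i < sent.length then
    if i + 2 < sent.length ∧ PySem.Str.lower (sent.getD i ("", "")).1 = "more"
        ∧ PySem.Str.lower (sent.getD (i + 2) ("", "")).1 = "than" then
      ((sent.getD i ("", "")).1, "RBR") :: ((sent.getD (i + 1) ("", "")).1, "JJ")
        :: ((sent.getD (i + 2) ("", "")).1, "IN") :: pvGo sent (i + 3)
    else sent.getD i ("", "") :: pvGo sent (i + 1)
  else []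
termination_by sent.length - i

lemma pvBStarts_lb (sent : List (String × String)) (i : Nat) :
    ∀ s ∈ pvBStarts sent i, i ≤ s := by
  fun_induction pvBStarts sent i with
  | case1 i h hm ih =>
    intro s hs
    rcases List.mem_cons.1 hs with rfl | hs
    · exact le_refl s
    · exact le_trans (by omega) (ih s hs)
  | case2 i h hm ih =>
    intro s hs; exact le_trans (by omega) (ih s hs)
  | case3 => intro s hs; simp at hs

lemma pvBEmit_starts (sent : List (String × String)) (i : Nat) :
    pvBEmit sent (pvBStarts sent i) i = pvGo sent i := by
  fun_induction pvGo sent i with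
  | case1 i h hm ih =>
    rw [pvBStarts, dif_pos h, if_pos hm, pvBEmit, dif_pos h]
    simp [ih]
  | case2 i h hm ih =>
    rw [pvBStarts, dif_pos h, if_neg hm]
    have hlb := pvBStarts_lb sent (i + 1)
    cases hst : pvBStarts sent (i + 1) with
    | nil => rw [pvBEmit, dif_pos h, ← hst, ih]
    | cons s rest =>
      have : s ≠ i := by
        have := hlb s (by rw [hst]; exact List.mem_cons_self); omega
      rw [pvBEmit, dif_pos h, ← hst, ih]
      simp only [if_neg this]
  | case3 i h =>
    rw [pvBStarts, dif_neg h, pvBEmit, dif_neg h]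

lemma pvALoop_eq (sent : List (String × String)) (i : Nat) :
    ∀ acc : List (String × String), pvALoop sent i 0 acc = acc ++ pvGo sent i := by
  fun_induction pvGo sent i with
  | case1 i h hm ih =>
    intro acc
    obtain ⟨h2, hmore, hthan⟩ := hm
    have hbor : PySem.Int.bor 0 ((i : Int) + 2) = (i : Int) + 2 := by
      rw [PySem.Int.bor_comm]; simp
    rw [pvALoop, dif_pos h, if_neg (by norm_num), hbor,
        if_neg (by omega),
        if_pos (by simp only [Bool.and_eq_true, beq_iff_eq]; exact ⟨hmore, hthan⟩)]
    -- the two skip iterations after a match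
    rw [pvALoop, dif_pos (by omega : i + 1 < sent.length), if_pos (by norm_num)]
    rw [pvALoop, dif_pos (by omega : i + 2 < sent.length), if_pos (by norm_num)]
    simp only [show i + 1 + 1 + 1 = i + 3 from rfl, show (2 : Int) - 1 - 1 = 0 from rfl]
    rw [ih]
    simp
  | case2 i h hm ih =>
    intro acc
    have hbor : PySem.Int.bor 0 ((i : Int) + 2) = (i : Int) + 2 := by
      rw [PySem.Int.bor_comm]; simp
    rw [pvALoop, dif_pos h, if_neg (by norm_num), hbor]
    by_cases hb : (i : Int) < (i : Int) + 2 ∧ (i : Int) + 2 ≥ (sent.length : Int)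
    · rw [if_pos hb, ih]; simp
    · have h2 : i + 2 < sent.length := by push_cast at hb; omega
      have hcond : ¬ (PySem.Str.lower (sent.getD i ("", "")).1 == "more"
          && PySem.Str.lower (sent.getD (i + 2) ("", "")).1 == "than") = true := by
        simp only [Bool.and_eq_true, beq_iff_eq]
        intro ⟨a, b⟩; exact hm ⟨h2, a, b⟩
      rw [if_neg hb, if_neg hcond, ih]; simp
  | case3 i h =>
    intro acc
    rw [pvALoop, dif_neg h]
    simp

-- ===== VERDICT (by name: the statement is the Claim_ definition above) =====
theorem more_UNK_than_AdjectiveTagger_spec : Claim_equal_more_UNK_than_AdjectiveTagger := by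
  intro sent _
  unfold Spec_more_UNK_than_AdjectiveTagger more_UNK_than_AdjectiveTagger more_UNK_than_AdjectiveTagger_alt
  rw [pvALoop_eq, pvBEmit_starts]
  simp
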